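-- pv_equiv track=rewrite | github.com/nagulan-d/threatguard-cybersecurity-project | backend/live_threat_fetcher.py | categorize_threat
-- ===== SOURCE A (Python) =====
-- from typing import List, Dict, Set
--
-- def categorize_threat(indicator_type: str, tags: List[str]) -> str:
--     """Categorize threat based on type and tags."""
--     tags_str = " ".join(tags).lower()
--
--     if any(kw in tags_str for kw in ["phish", "credential", "spoof"]):
--         return "Phishing"
--     elif any(kw in tags_str for kw in ["ransom", "locker", "encryptor"]):
--         return "Ransomware"
--     elif any(kw in tags_str for kw in ["malware", "trojan", "virus", "worm", "botnet"]):
--         return "Malware"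
--     elif any(kw in tags_str for kw in ["ddos", "denial", "dos"]):
--         return "DDoS Attacks"
--     elif any(kw in tags_str for kw in ["cve", "exploit", "vulnerab", "rce", "0day", "zero-day"]):
--         return "Vulnerability Exploits"
--     elif indicator_type in ["ipv4", "ip", "hostname", "dns", "domain"]:
--         return "Current Threats"
--     elif indicator_type in ["url", "uri"]:
--         return "Malware"
--     else:
--         return "Other"
-- ===== SOURCE B (Python) =====
-- # Per-tag scan: no joined string is built. Every keyword is space-free, so it occurs in
-- # " ".join(tags).lower() iff it occurs in some single tag.lower(); we rank each tag by its
-- # first matching keyword (flat priority table) and keep the minimum rank across tags.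
-- _KW_RANK = [
--     ("phish", 0), ("credential", 0), ("spoof", 0),
--     ("ransom", 1), ("locker", 1), ("encryptor", 1),
--     ("malware", 2), ("trojan", 2), ("virus", 2), ("worm", 2), ("botnet", 2),
--     ("ddos", 3), ("denial", 3), ("dos", 3),
--     ("cve", 4), ("exploit", 4), ("vulnerab", 4), ("rce", 4), ("0day", 4), ("zero-day", 4),
-- ]
--
-- _CATEGORIES = ["Phishing", "Ransomware", "Malware", "DDoS Attacks", "Vulnerability Exploits"]
--
--
-- def _rank(tag):
--     t = tag.lower()
--     for kw, r in _KW_RANK: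
--         if kw in t:
--             return r
--     return 5
--
--
-- def categorize_threat(indicator_type, tags):
--     """Categorize threat based on type and tags."""
--     best = 5
--     for tag in tags:
--         best = min(best, _rank(tag))
--     if best < 5:
--         return _CATEGORIES[best]
--     if indicator_type in ("ipv4", "ip", "hostname", "dns", "domain"):
--         return "Current Threats"
--     if indicator_type in ("url", "uri"):
--         return "Malware"
--     return "Other"
-- ===== Notes on version B (the rewrite author's own statement) =====
-- stated objective: alternative
-- what changed: B never builds the joined tags string: since every keyword is space-free it occurs in ' '.join(tags).lower() iff it occurs in a single tag, so B ranks each tag by its first match in a flat keyword->priority table and keeps the minimum rank over tags, then indexes a category list, falling back to the two indicator_type membership tests.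
import Mathlib
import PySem

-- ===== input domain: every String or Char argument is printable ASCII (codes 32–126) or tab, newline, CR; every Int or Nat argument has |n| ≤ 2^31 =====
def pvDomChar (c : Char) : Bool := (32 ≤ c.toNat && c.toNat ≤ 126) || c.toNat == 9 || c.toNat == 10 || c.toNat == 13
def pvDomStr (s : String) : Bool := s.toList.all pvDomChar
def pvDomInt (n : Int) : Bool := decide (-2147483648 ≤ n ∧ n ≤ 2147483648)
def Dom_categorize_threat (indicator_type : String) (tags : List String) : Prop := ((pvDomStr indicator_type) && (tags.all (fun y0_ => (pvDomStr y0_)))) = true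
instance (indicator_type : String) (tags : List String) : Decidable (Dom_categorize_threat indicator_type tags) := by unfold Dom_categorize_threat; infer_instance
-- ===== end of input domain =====

-- B ranks each tag separately by a flat keyword->priority table and keeps the minimum rank over
-- the tags (no joined string is built; every keyword is space-free, so the result agrees with A);
-- objective: alternative decomposition.

-- ===== PORT A =====
def categorize_threat (indicator_type : String) (tags : List String) : String :=
  let tags_str := PySem.Str.lower (PySem.Str.join " " tags)
  if (["phish", "credential", "spoof"].any (fun kw => PySem.Str.isIn kw tags_str)) then "Phishing"
  else if (["ransom", "locker", "encryptor"].any (fun kw => PySem.Str.isIn kw tags_str)) then "Ransomware"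
  else if (["malware", "trojan", "virus", "worm", "botnet"].any (fun kw => PySem.Str.isIn kw tags_str)) then "Malware"
  else if (["ddos", "denial", "dos"].any (fun kw => PySem.Str.isIn kw tags_str)) then "DDoS Attacks"
  else if (["cve", "exploit", "vulnerab", "rce", "0day", "zero-day"].any (fun kw => PySem.Str.isIn kw tags_str)) then "Vulnerability Exploits"
  else if (["ipv4", "ip", "hostname", "dns", "domain"].contains indicator_type) then "Current Threats"
  else if (["url", "uri"].contains indicator_type) then "Malware"
  else "Other"

-- ===== PORT B =====
def pvKwRank : List (String × Nat) :=
  [ ("phish", 0), ("credential", 0), ("spoof", 0),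
    ("ransom", 1), ("locker", 1), ("encryptor", 1),
    ("malware", 2), ("trojan", 2), ("virus", 2), ("worm", 2), ("botnet", 2),
    ("ddos", 3), ("denial", 3), ("dos", 3),
    ("cve", 4), ("exploit", 4), ("vulnerab", 4), ("rce", 4), ("0day", 4), ("zero-day", 4) ]

def pvRankLoop (t : String) : List (String × Nat) → Nat
  | [] => 5
  | (kw, r) :: rest => if PySem.Str.isIn kw t then r else pvRankLoop t rest

def pvRank (tag : String) : Nat := pvRankLoop (PySem.Str.lower tag) pvKwRank


def pvCategories : List String :=
  ["Phishing", "Ransomware", "Malware", "DDoS Attacks", "Vulnerability Exploits"]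

def categorize_threat_alt (indicator_type : String) (tags : List String) : String :=
  let best := tags.foldl (fun b tag => min b (pvRank tag)) 5
  if best < 5 then pvCategories.getD best "Other"
  else if (["ipv4", "ip", "hostname", "dns", "domain"].contains indicator_type) then "Current Threats"
  else if (["url", "uri"].contains indicator_type) then "Malware"
  else "Other"

-- ===== PRECONDITION & SPEC =====
def Spec_categorize_threat (indicator_type : String) (tags : List String) (out : String) : Prop := out = categorize_threat_alt indicator_type tags
instance (indicator_type : String) (tags : List String) (out : String) : Decidable (Spec_categorize_threat indicator_type tags out) := by unfold Spec_categorize_threat; infer_instance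

-- ===== CLAIM (what is proved, stated in full; the proofs are below) =====
def Claim_equal_categorize_threat : Prop := ∀ (indicator_type : String) (tags : List String), Dom_categorize_threat indicator_type tags → Spec_categorize_threat indicator_type tags (categorize_threat indicator_type tags)

-- ===== LEMMAS AND PROOFS =====



theorem pv_infix_append_sep {α : Type} {sep : α} {l a b : List α}
    (h : sep ∉ l) : l <:+: a ++ sep :: b ↔ l <:+: a ∨ l <:+: b := by
  constructor
  · rintro ⟨s, t, hst⟩
    by_cases h1 : s.length + l.length ≤ a.length
    · left
      have hp : (s ++ l) <+: a ++ sep :: b := ⟨t, by simpa [List.append_assoc] using hst⟩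
      have hlen : (s ++ l).length ≤ a.length := by simpa using h1
      have hpa : (s ++ l) <+: a := by
        have h2 := List.prefix_iff_eq_take.mp hp
        rw [List.take_append_of_le_length hlen] at h2
        exact List.prefix_iff_eq_take.mpr h2
      exact List.IsInfix.trans ⟨s, [], by simp⟩ hpa.isInfix
    · by_cases h2 : a.length + 1 ≤ s.length
      · right
        have hp : (a ++ [sep]) <+: s ++ (l ++ t) := by
          rw [← List.append_assoc, hst]
          exact ⟨b, by simp⟩
        have hlen : (a ++ [sep]).length ≤ s.length := by simpa using h2
        have hpa : (a ++ [sep]) <+: s := by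
          have h3 := List.prefix_iff_eq_take.mp hp
          rw [List.take_append_of_le_length hlen] at h3
          exact List.prefix_iff_eq_take.mpr h3
        obtain ⟨s', rfl⟩ := hpa
        have : s' ++ l ++ t = b := by
          have := hst
          simp only [List.append_assoc] at this ⊢
          simpa using this
        exact ⟨s', t, by simpa [List.append_assoc] using this⟩
      · exfalso
        have hk : a.length - s.length < l.length := by omega
        have e1 : (s ++ (l ++ t))[a.length]? = some sep := by
          rw [← List.append_assoc, hst]
          rw [List.getElem?_append_right (by omega)]
          simp
        rw [List.getElem?_append_right (by omega)] at e1
        rw [List.getElem?_append_left (by omega)] at e1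
        exact h (List.mem_of_getElem? e1)
  · rintro (hl | hl)
    · exact hl.trans (a.prefix_append (sep :: b)).isInfix
    · exact hl.trans ((List.suffix_cons sep b).trans (List.suffix_append a (sep :: b))).isInfix


-- lower commutes with join on [' ']
theorem pv_lower_join (ps : List (List Char)) :
    PySem.Chars.lower (PySem.Chars.join [' '] ps) =
      PySem.Chars.join [' '] (ps.map PySem.Chars.lower) := by
  induction ps with
  | nil => simp [PySem.Chars.join_nil, PySem.Chars.lower]
  | cons p ps ih =>
    cases ps with
    | nil => simp [PySem.Chars.join_singleton]
    | cons q rest =>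
      simp only [List.map_cons] at ih ⊢
      rw [PySem.Chars.join_cons_cons, PySem.Chars.join_cons_cons]
      simp only [PySem.Chars.lower, List.map_append] at ih ⊢
      rw [ih]
      rfl

theorem pv_infix_join {l : List Char} (hne : l ≠ []) (h : (' ' : Char) ∉ l)
    (parts : List (List Char)) :
    l <:+: PySem.Chars.join [' '] parts ↔ ∃ p ∈ parts, l <:+: p := by
  induction parts with
  | nil => simp [PySem.Chars.join_nil, hne]
  | cons p ps ih =>
    cases ps with
    | nil => simp [PySem.Chars.join_singleton]
    | cons q rest =>
      rw [PySem.Chars.join_cons_cons]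
      rw [show p ++ [' '] ++ PySem.Chars.join [' '] (q :: rest)
            = p ++ ' ' :: PySem.Chars.join [' '] (q :: rest) by simp]
      rw [pv_infix_append_sep h, ih]
      simp


def pvTagHit (kws : List String) (t : String) : Bool :=
  kws.any (fun kw => PySem.Str.isIn kw (PySem.Str.lower t))

def pvG (kws : List String) (tags : List String) : Bool := tags.any (pvTagHit kws)

def pvC (b0 b1 b2 b3 b4 : Bool) : Nat :=
  if b0 then 0 else if b1 then 1 else if b2 then 2 else if b3 then 3 else if b4 then 4 else 5

def pvT (tags : List String) : Nat :=
  pvC (pvG ["phish", "credential", "spoof"] tags) (pvG ["ransom", "locker", "encryptor"] tags) (pvG ["malware", "trojan", "virus", "worm", "botnet"] tags) (pvG ["ddos", "denial", "dos"] tags) (pvG ["cve", "exploit", "vulnerab", "rce", "0day", "zero-day"] tags)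

-- keyword occurs in the lowered joined string iff in some lowered tag (space-free nonempty kw)
theorem pv_isIn_lower_join (kw : String) (tags : List String)
    (hne : kw.toList ≠ []) (hsp : (' ' : Char) ∉ kw.toList) :
    PySem.Str.isIn kw (PySem.Str.lower (PySem.Str.join " " tags)) =
      tags.any (fun t => PySem.Str.isIn kw (PySem.Str.lower t)) := by
  have key : PySem.Str.isIn kw (PySem.Str.lower (PySem.Str.join " " tags)) = true ↔
      tags.any (fun t => PySem.Str.isIn kw (PySem.Str.lower t)) = true := by
    rw [PySem.Str.isIn_iff_infix, PySem.Str.toList_lower, PySem.Str.toList_join]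
    rw [show (" " : String).toList = [' '] from rfl]
    rw [pv_lower_join, pv_infix_join hne hsp]
    simp only [List.map_map, List.any_eq_true, List.mem_map, Function.comp]
    constructor
    · rintro ⟨p, ⟨t, ht, rfl⟩, hinf⟩
      refine ⟨t, ht, ?_⟩
      rw [PySem.Str.isIn_iff_infix, PySem.Str.toList_lower]
      exact hinf
    · rintro ⟨t, ht, hin⟩
      refine ⟨PySem.Chars.lower t.toList, ⟨t, ht, rfl⟩, ?_⟩
      rw [PySem.Str.isIn_iff_infix, PySem.Str.toList_lower] at hin
      exact hin
  exact Bool.coe_iff_coe.mp key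

-- A's group check over the joined string equals the per-tag group check
theorem pv_groupAny (kws : List String) (tags : List String)
    (h : ∀ kw ∈ kws, kw.toList ≠ [] ∧ (' ' : Char) ∉ kw.toList) :
    (kws.any (fun kw => PySem.Str.isIn kw (PySem.Str.lower (PySem.Str.join " " tags)))) =
      pvG kws tags := by
  have key : (kws.any (fun kw => PySem.Str.isIn kw (PySem.Str.lower (PySem.Str.join " " tags)))) = true ↔
      pvG kws tags = true := by
    simp only [pvG, pvTagHit, List.any_eq_true]
    constructor
    · rintro ⟨kw, hkw, hin⟩
      rw [pv_isIn_lower_join kw tags (h kw hkw).1 (h kw hkw).2] at hin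
      obtain ⟨t, ht, h2⟩ := List.any_eq_true.mp hin
      exact ⟨t, ht, kw, hkw, h2⟩
    · rintro ⟨t, ht, kw, hkw, h2⟩
      refine ⟨kw, hkw, ?_⟩
      rw [pv_isIn_lower_join kw tags (h kw hkw).1 (h kw hkw).2]
      exact List.any_eq_true.mpr ⟨t, ht, h2⟩
  exact Bool.coe_iff_coe.mp key

-- the inner loop over a constant-rank group
theorem pv_rankLoop_group (kws : List String) (r : Nat) (t : String) (rest : List (String × Nat)) :
    pvRankLoop t (kws.map (fun kw => (kw, r)) ++ rest) =
      if kws.any (fun kw => PySem.Str.isIn kw t) then r else pvRankLoop t rest := by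
  induction kws with
  | nil => simp
  | cons kw kws ih =>
    simp only [List.map_cons, List.cons_append, pvRankLoop]
    cases hk : PySem.Str.isIn kw t with
    | true =>
      have hk' : PySem.Chars.isIn kw.toList t.toList = true := by simpa using hk
      simp [List.any_cons, hk']
    | false =>
      have hk' : PySem.Chars.isIn kw.toList t.toList = false := by simpa using hk
      simp [List.any_cons, hk', ih]

theorem pv_rank_eq (t : String) :
    pvRank t = pvC (pvTagHit ["phish", "credential", "spoof"] t) (pvTagHit ["ransom", "locker", "encryptor"] t) (pvTagHit ["malware", "trojan", "virus", "worm", "botnet"] t)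
      (pvTagHit ["ddos", "denial", "dos"] t) (pvTagHit ["cve", "exploit", "vulnerab", "rce", "0day", "zero-day"] t) := by
  have hdec : pvKwRank = ["phish", "credential", "spoof"].map (fun kw => (kw, 0)) ++ (["ransom", "locker", "encryptor"].map (fun kw => (kw, 1)) ++
      (["malware", "trojan", "virus", "worm", "botnet"].map (fun kw => (kw, 2)) ++ (["ddos", "denial", "dos"].map (fun kw => (kw, 3)) ++
      (["cve", "exploit", "vulnerab", "rce", "0day", "zero-day"].map (fun kw => (kw, 4)) ++ [])))) := rfl
  rw [pvRank, hdec, pv_rankLoop_group, pv_rankLoop_group, pv_rankLoop_group,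
    pv_rankLoop_group, pv_rankLoop_group]
  simp [pvC, pvTagHit, pvRankLoop]

theorem pv_min_cascade : ∀ a0 a1 a2 a3 a4 b0 b1 b2 b3 b4 : Bool,
    min (pvC a0 a1 a2 a3 a4) (pvC b0 b1 b2 b3 b4) =
      pvC (a0 || b0) (a1 || b1) (a2 || b2) (a3 || b3) (a4 || b4) := by decide

theorem pv_C_le (b0 b1 b2 b3 b4 : Bool) : pvC b0 b1 b2 b3 b4 ≤ 5 := by
  cases b0 <;> cases b1 <;> cases b2 <;> cases b3 <;> cases b4 <;> decide

theorem pv_fold_min (tags : List String) : ∀ b : Nat, b ≤ 5 →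
    tags.foldl (fun b tag => min b (pvRank tag)) b = min b (pvT tags) := by
  induction tags with
  | nil => intro b hb; simp [pvT, pvG, pvC, Nat.min_eq_left hb]
  | cons t ts ih =>
    intro b hb
    have hr : pvRank t ≤ 5 := by rw [pv_rank_eq]; exact pv_C_le _ _ _ _ _
    simp only [List.foldl_cons]
    rw [ih (min b (pvRank t)) (by omega)]
    rw [Nat.min_assoc]
    congr 1
    rw [pv_rank_eq]
    simp only [pvT, pvG, List.any_cons]
    exact pv_min_cascade _ _ _ _ _ _ _ _ _ _


-- ===== VERDICT (by name: the statement is the Claim_ definition above) =====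
theorem categorize_threat_spec : Claim_equal_categorize_threat := by
  intro it tags _
  unfold Spec_categorize_threat
  have e0 := pv_groupAny ["phish", "credential", "spoof"] tags (by decide)
  have e1 := pv_groupAny ["ransom", "locker", "encryptor"] tags (by decide)
  have e2 := pv_groupAny ["malware", "trojan", "virus", "worm", "botnet"] tags (by decide)
  have e3 := pv_groupAny ["ddos", "denial", "dos"] tags (by decide)
  have e4 := pv_groupAny ["cve", "exploit", "vulnerab", "rce", "0day", "zero-day"] tags (by decide)
  have hT : tags.foldl (fun b tag => min b (pvRank tag)) 5 = pvT tags := by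
    rw [pv_fold_min tags 5 le_rfl, pvT]
    exact Nat.min_eq_right (pv_C_le _ _ _ _ _)
  simp only [categorize_threat, categorize_threat_alt, e0, e1, e2, e3, e4, hT]
  cases hg0 : pvG ["phish", "credential", "spoof"] tags <;>
    cases hg1 : pvG ["ransom", "locker", "encryptor"] tags <;>
    cases hg2 : pvG ["malware", "trojan", "virus", "worm", "botnet"] tags <;>
    cases hg3 : pvG ["ddos", "denial", "dos"] tags <;>
    cases hg4 : pvG ["cve", "exploit", "vulnerab", "rce", "0day", "zero-day"] tags <;>
    simp_all [pvT, pvC, pvCategories]
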